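-- pv_equiv track=rewrite | github.com/viibeware/trusted-servants-pro | app/sidebar.py | _ordered_keys
-- ===== SOURCE A (Python) =====
-- PINNED_KEYS = frozenset({"dashboard"})
--
-- def _ordered_keys(stored, catalog_keys, sort_mode, label_lookup):
--     """Resolve the order of items inside a section. Manual mode reads
--     `stored` (with append-fallback for new items not yet in the saved
--     order). Auto modes alphabetise on label.
--
--     Pinned keys (currently just ``dashboard``) are always emitted first
--     in their original catalog order regardless of sort mode, so an admin
--     can't accidentally bury the home link by reordering."""
--     pinned = [k for k in catalog_keys if k in PINNED_KEYS]
--     sortable = [k for k in catalog_keys if k not in PINNED_KEYS]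
--
--     if sort_mode == "manual" and stored:
--         seen = set()
--         # Strip any pinned keys the saved order included by accident —
--         # they're never reorderable, so the saved JSON shouldn't carry
--         # them. Append-fallback for new keys not yet in stored.
--         out = [k for k in stored if k in sortable and not (k in seen or seen.add(k))]
--         for k in sortable:
--             if k not in seen:
--                 out.append(k)
--         return pinned + out
--
--     keys = list(sortable)
--     keys.sort(key=lambda k: (label_lookup.get(k) or "").lower(),
--               reverse=(sort_mode == "auto-desc"))
--     return pinned + keys
-- ===== SOURCE B (Python) =====
-- PINNED_KEYS = frozenset({"dashboard"})
--
-- def _ordered_keys(stored, catalog_keys, sort_mode, label_lookup):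
--     pinned = [k for k in catalog_keys if k in PINNED_KEYS]
--     sortable = [k for k in catalog_keys if k not in PINNED_KEYS]
--
--     if sort_mode == "manual" and stored:
--         # First-occurrence position of each key in the saved order.
--         pos = {}
--         for i, k in enumerate(stored):
--             pos.setdefault(k, i)
--         # One stable sort: saved keys in saved order first, the rest
--         # keep catalog order behind the sentinel len(stored).
--         return pinned + sorted(sortable, key=lambda k: pos.get(k, len(stored)))
--
--     return pinned + sorted(sortable,
--                            key=lambda k: (label_lookup.get(k) or "").lower(),
--                            reverse=(sort_mode == "auto-desc"))
-- ===== Notes on version B (the rewrite author's own statement) =====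
-- stated objective: simpler
-- what changed: Replaces the manual branch's two-pass seen-set/append construction with a first-occurrence position dict over `stored` and one stable sort of `sortable` keyed by pos.get(k, len(stored)).
-- outside the precondition, e.g. on _ordered_keys(['a'], ['a', 'a'], 'manual', {}): A returns ['a'], B returns ['a', 'a']
import Mathlib
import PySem

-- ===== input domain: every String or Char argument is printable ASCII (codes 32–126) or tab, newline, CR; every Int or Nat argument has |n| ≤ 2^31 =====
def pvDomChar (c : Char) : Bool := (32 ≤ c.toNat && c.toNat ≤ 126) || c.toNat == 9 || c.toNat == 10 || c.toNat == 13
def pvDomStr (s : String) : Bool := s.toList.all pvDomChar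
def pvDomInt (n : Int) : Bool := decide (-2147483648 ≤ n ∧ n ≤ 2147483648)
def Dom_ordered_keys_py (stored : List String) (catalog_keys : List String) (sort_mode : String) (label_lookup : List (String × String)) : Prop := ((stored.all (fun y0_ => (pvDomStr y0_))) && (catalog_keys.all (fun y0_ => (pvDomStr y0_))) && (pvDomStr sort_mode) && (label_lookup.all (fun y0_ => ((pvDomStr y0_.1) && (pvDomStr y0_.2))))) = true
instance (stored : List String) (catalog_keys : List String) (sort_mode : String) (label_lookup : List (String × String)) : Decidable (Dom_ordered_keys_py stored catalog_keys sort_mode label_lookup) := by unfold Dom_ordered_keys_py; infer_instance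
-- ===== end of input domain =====

-- B replaces the manual branch's two-pass seen-set/append construction with a
-- first-occurrence position table over `stored` and ONE stable sort of the
-- sortable keys (sentinel len(stored) keeps new keys in catalog order): simpler.

-- ===== PORT A =====
def PINNED_KEYS : PySem.Set String := PySem.Set.ofList ["dashboard"]

def ordered_keys_py (stored : List String) (catalog_keys : List String) (sort_mode : String) (label_lookup : List (String × String)) : List String :=
  let pinned := catalog_keys.filter (fun k => PySem.Set.contains PINNED_KEYS k)
  let sortable := catalog_keys.filter (fun k => !PySem.Set.contains PINNED_KEYS k)
  if sort_mode == "manual" && !stored.isEmpty then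
    -- seen = set(); out = [k for k in stored if k in sortable and not (k in seen or seen.add(k))]
    let p := stored.foldl (fun (acc : List String × PySem.Set String) k =>
      if sortable.contains k then
        if PySem.Set.contains acc.2 k then acc
        else (acc.1 ++ [k], PySem.Set.add acc.2 k)
      else acc) ([], PySem.Set.empty)
    -- for k in sortable: if k not in seen: out.append(k)
    let out := sortable.foldl (fun out k => if !PySem.Set.contains p.2 k then out ++ [k] else out) p.1
    pinned ++ out
  else
    -- keys = list(sortable); keys.sort(key=..., reverse=(sort_mode == "auto-desc"))
    let keys := PySem.List.sorted sortable
      (fun k => PySem.Str.lower (((PySem.Dict.mk label_lookup).get? k).getD ""))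
      (sort_mode == "auto-desc")
    pinned ++ keys

-- ===== PORT B =====
def ordered_keys_py_alt (stored : List String) (catalog_keys : List String) (sort_mode : String) (label_lookup : List (String × String)) : List String :=
  let pinned := catalog_keys.filter (fun k => PySem.Set.contains PINNED_KEYS k)
  let sortable := catalog_keys.filter (fun k => !PySem.Set.contains PINNED_KEYS k)
  if sort_mode == "manual" && !stored.isEmpty then
    -- pos = {}; for i, k in enumerate(stored): pos.setdefault(k, i)
    let pos := (PySem.List.enumerate stored).foldl
      (fun d (p : Int × String) => PySem.Dict.setdefault d p.2 p.1) PySem.Dict.empty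
    -- one stable sort keyed by pos.get(k, len(stored))
    pinned ++ PySem.List.sorted sortable (fun k => PySem.Dict.getD pos k (stored.length : Int)) false
  else
    pinned ++ PySem.List.sorted sortable
      (fun k => PySem.Str.lower (((PySem.Dict.mk label_lookup).get? k).getD ""))
      (sort_mode == "auto-desc")

-- ===== PRECONDITION & SPEC =====
-- Pre_ excludes one accidental corner: in manual mode with a saved order, a
-- non-pinned catalog key that occurs MORE THAN ONCE in the catalog and also
-- appears in `stored` — A emits such a duplicate key once (its seen-set dedups
-- it) while repeating every other duplicate; with unique catalog keys (the
-- real case) nothing is excluded.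
def Pre_ordered_keys_py (stored : List String) (catalog_keys : List String) (sort_mode : String) (label_lookup : List (String × String)) : Prop :=
  sort_mode = "manual" → stored ≠ [] → ∀ k ∈ stored, k = "dashboard" ∨ catalog_keys.count k ≤ 1
instance (stored : List String) (catalog_keys : List String) (sort_mode : String) (label_lookup : List (String × String)) : Decidable (Pre_ordered_keys_py stored catalog_keys sort_mode label_lookup) := by unfold Pre_ordered_keys_py; infer_instance

def pvWitness_ordered_keys_py : List String × List String × String × (List (String × String)) :=
  (["a"], ["dashboard", "b", "a"], "manual", [("a", "A")])

def Spec_ordered_keys_py (stored : List String) (catalog_keys : List String) (sort_mode : String) (label_lookup : List (String × String)) (out : List String) : Prop := out = ordered_keys_py_alt stored catalog_keys sort_mode label_lookup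
instance (stored : List String) (catalog_keys : List String) (sort_mode : String) (label_lookup : List (String × String)) (out : List String) : Decidable (Spec_ordered_keys_py stored catalog_keys sort_mode label_lookup out) := by unfold Spec_ordered_keys_py; infer_instance

-- ===== CLAIM (what is proved, stated in full; the proofs are below) =====
def Claim_equal_ordered_keys_py : Prop := ∀ (stored : List String) (catalog_keys : List String) (sort_mode : String) (label_lookup : List (String × String)), Dom_ordered_keys_py stored catalog_keys sort_mode label_lookup → Pre_ordered_keys_py stored catalog_keys sort_mode label_lookup → Spec_ordered_keys_py stored catalog_keys sort_mode label_lookup (ordered_keys_py stored catalog_keys sort_mode label_lookup)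

-- ===== LEMMAS AND PROOFS =====

-- A's first manual-mode loop, written as structural recursion on `stored`:
-- the appended keys and the final seen set.
def dmNew (sortable : List String) : List String → PySem.Set String → List String
  | [], _ => []
  | k :: rest, seen =>
    if sortable.contains k then
      if PySem.Set.contains seen k then dmNew sortable rest seen
      else k :: dmNew sortable rest (PySem.Set.add seen k)
    else dmNew sortable rest seen

def dmSeen (sortable : List String) : List String → PySem.Set String → PySem.Set String
  | [], seen => seen
  | k :: rest, seen =>
    if sortable.contains k then
      if PySem.Set.contains seen k then dmSeen sortable rest seen
      else dmSeen sortable rest (PySem.Set.add seen k)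
    else dmSeen sortable rest seen

lemma loop1_eq (sortable stored : List String) (out : List String) (seen : PySem.Set String) :
    stored.foldl (fun (acc : List String × PySem.Set String) k =>
      if sortable.contains k then
        if PySem.Set.contains acc.2 k then acc
        else (acc.1 ++ [k], PySem.Set.add acc.2 k)
      else acc) (out, seen)
    = (out ++ dmNew sortable stored seen, dmSeen sortable stored seen) := by
  induction stored generalizing out seen with
  | nil => simp [dmNew, dmSeen]
  | cons k rest ih =>
    rw [List.foldl_cons]
    by_cases h1 : k ∈ sortable
    · by_cases h2 : k ∈ seen
      · have hc1 : sortable.contains k = true := by simpa using h1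
        have hc2 : PySem.Set.contains seen k = true := by simpa using h2
        simp only [dmNew, dmSeen, hc1, hc2, if_true]
        exact ih out seen
      · have hc1 : sortable.contains k = true := by simpa using h1
        have hc2 : PySem.Set.contains seen k = false := by simpa using h2
        simp only [dmNew, dmSeen, hc1, hc2, if_true, Bool.false_eq_true, if_false]
        rw [ih]
        simp
    · have hc1 : sortable.contains k = false := by simpa using h1
      simp only [dmNew, dmSeen, hc1, Bool.false_eq_true, if_false]
      exact ih out seen

lemma mem_dmNew (sortable stored : List String) (seen : PySem.Set String) (x : String) :
    x ∈ dmNew sortable stored seen ↔ x ∈ stored ∧ x ∈ sortable ∧ x ∉ seen := by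
  induction stored generalizing seen with
  | nil => simp [dmNew]
  | cons k rest ih =>
    simp only [dmNew, PySem.Set.contains_iff, List.contains_iff_mem, List.mem_cons]
    by_cases h1 : k ∈ sortable <;> by_cases h2 : k ∈ seen <;>
      simp only [h1, h2, if_true, if_false, ih, PySem.Set.mem_add, List.mem_cons] <;>
      by_cases hxk : x = k <;> first | (subst hxk; tauto) | tauto

lemma nodup_dmNew (sortable stored : List String) (seen : PySem.Set String) :
    (dmNew sortable stored seen).Nodup := by
  induction stored generalizing seen with
  | nil => simp [dmNew]
  | cons k rest ih =>
    simp only [dmNew, PySem.Set.contains_iff, List.contains_iff_mem]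
    by_cases h1 : k ∈ sortable <;> by_cases h2 : k ∈ seen <;>
      simp only [h1, h2, if_true, if_false]
    · exact ih seen
    · refine List.Nodup.cons ?_ (ih _)
      intro hmem
      exact ((mem_dmNew _ _ _ _).1 hmem).2.2 ((PySem.Set.mem_add _ _ _).2 (Or.inr rfl))
    · exact ih seen
    · exact ih seen

lemma dmNew_pairwise (sortable stored : List String) (seen : PySem.Set String) :
    (dmNew sortable stored seen).Pairwise (fun a b => stored.idxOf a < stored.idxOf b) := by
  induction stored generalizing seen with
  | nil => simp [dmNew]
  | cons k rest ih =>
    have lift : ∀ (s : PySem.Set String),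
        (∀ x ∈ dmNew sortable rest s, x ≠ k) →
        (dmNew sortable rest s).Pairwise (fun a b => (k :: rest).idxOf a < (k :: rest).idxOf b) := by
      intro s hne
      refine List.Pairwise.imp_of_mem ?_ (ih s)
      intro a b ha hb hab
      have hka' : ¬(k = a) := fun h => hne a ha h.symm
      have hkb' : ¬(k = b) := fun h => hne b hb h.symm
      have hka : (k == a) = false := by simp [hka']
      have hkb : (k == b) = false := by simp [hkb']
      simp only [List.idxOf_cons, hka, hkb, cond_false]
      omega
    simp only [dmNew, PySem.Set.contains_iff, List.contains_iff_mem]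
    by_cases h1 : k ∈ sortable <;> by_cases h2 : k ∈ seen <;>
      simp only [h1, h2, if_true, if_false]
    · refine lift seen fun x hx hxk => ?_
      subst hxk
      exact ((mem_dmNew _ _ _ _).1 hx).2.2 h2
    · have hne : ∀ x ∈ dmNew sortable rest (PySem.Set.add seen k), x ≠ k := by
        intro x hx hxk
        subst hxk
        exact ((mem_dmNew _ _ _ _).1 hx).2.2 ((PySem.Set.mem_add _ _ _).2 (Or.inr rfl))
      refine List.Pairwise.cons ?_ (lift _ hne)
      intro b hb
      have hkb' : ¬(k = b) := fun h => hne b hb h.symm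
      have hkb : (k == b) = false := by simp [hkb']
      simp only [List.idxOf_cons, hkb, cond_false, beq_self_eq_true, cond_true]
      omega
    · refine lift seen fun x hx hxk => ?_
      subst hxk
      exact h1 ((mem_dmNew _ _ _ _).1 hx).2.1
    · refine lift seen fun x hx hxk => ?_
      subst hxk
      exact h1 ((mem_dmNew _ _ _ _).1 hx).2.1

lemma mem_dmSeen (sortable stored : List String) (seen : PySem.Set String) (x : String) :
    x ∈ dmSeen sortable stored seen ↔ x ∈ seen ∨ (x ∈ stored ∧ x ∈ sortable) := by
  induction stored generalizing seen with
  | nil => simp [dmSeen]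
  | cons k rest ih =>
    simp only [dmSeen, PySem.Set.contains_iff, List.contains_iff_mem, List.mem_cons]
    by_cases h1 : k ∈ sortable <;> by_cases h2 : k ∈ seen <;>
      simp only [h1, h2, if_true, if_false, ih, PySem.Set.mem_add, List.mem_cons] <;>
      by_cases hxk : x = k <;> first | (subst hxk; tauto) | tauto

-- B's position dict: getD is the first-occurrence index, or the default.
lemma setdefault_eq {κ ν : Type} [BEq κ] (d : PySem.Dict κ ν) (k : κ) (v : ν) :
    PySem.Dict.setdefault d k v = if d.contains k then d else d.insert k v := by
  by_cases h : d.contains k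
  · simp [PySem.Dict.setdefault, h]
  · have h' : d.contains k = false := by simpa using h
    apply PySem.Dict.ext
    simp [PySem.Dict.setdefault, h', PySem.Dict.items_insert_of_not_contains d v h']

lemma pos_getD_aux (stored : List String) (s : Int) (d : PySem.Dict String Int) (k : String) (dflt : Int) :
    PySem.Dict.getD ((PySem.List.enumerate stored s).foldl
      (fun d (p : Int × String) => PySem.Dict.setdefault d p.2 p.1) d) k dflt
    = if d.contains k then d.getD k dflt
      else if k ∈ stored then s + (stored.idxOf k : Int) else dflt := by
  induction stored generalizing s d with
  | nil =>
    simp only [PySem.List.enumerate_nil, List.foldl_nil, List.not_mem_nil, if_false]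
    by_cases h : d.contains k
    · simp [h]
    · simp [h, PySem.Dict.getD_of_not_contains d dflt (by simpa using h)]
  | cons x rest ih =>
    rw [PySem.List.enumerate_cons, List.foldl_cons, ih, setdefault_eq]
    by_cases hdx : d.contains x
    · simp only [hdx, if_true]
      by_cases hdk : d.contains k
      · simp [hdk]
      · have hkx : ¬(k = x) := fun h => hdk (h ▸ hdx)
        have hxk : ¬(x = k) := fun h => hkx h.symm
        have hbxk : (x == k) = false := by simp [hxk]
        simp only [hdk, Bool.false_eq_true, if_false, List.mem_cons, hkx, false_or,
          List.idxOf_cons, hbxk, cond_false]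
        by_cases hkr : k ∈ rest
        · simp only [hkr, if_true]
          push_cast
          omega
        · simp [hkr]
    · have hdx' : d.contains x = false := by simpa using hdx
      simp only [hdx', Bool.false_eq_true, if_false]
      by_cases hkx : k = x
      · subst hkx
        simp [PySem.Dict.contains_insert, PySem.Dict.getD_insert, hdx', List.idxOf_cons]
      · have hc : (d.insert x s).contains k = d.contains k := by
          simp [PySem.Dict.contains_insert, beq_iff_eq, hkx]
        have hg : (d.insert x s).getD k dflt = d.getD k dflt := by
          simp [PySem.Dict.getD_insert, hkx]
        rw [hc, hg]
        by_cases hdk : d.contains k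
        · simp [hdk]
        · have hxk : ¬(x = k) := fun h => hkx h.symm
          have hbxk : (x == k) = false := by simp [hxk]
          simp only [hdk, Bool.false_eq_true, if_false, List.mem_cons, hkx, false_or,
            List.idxOf_cons, hbxk, cond_false]
          by_cases hkr : k ∈ rest
          · simp only [hkr, if_true]
            push_cast
            omega
          · simp [hkr]

lemma pos_getD (stored : List String) (k : String) (dflt : Int) :
    PySem.Dict.getD ((PySem.List.enumerate stored).foldl
      (fun d (p : Int × String) => PySem.Dict.setdefault d p.2 p.1) PySem.Dict.empty) k dflt
    = if k ∈ stored then (stored.idxOf k : Int) else dflt := by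
  rw [pos_getD_aux]
  simp [PySem.Dict.contains_empty]

-- Stable-sort split: with every key ≤ c, the keys < c sort ahead of the
-- (stable, order-preserving) block of keys = c.
lemma insertBy_append_right {α : Type} (before : α → α → Bool) (x : α) (l1 l2 : List α)
    (h : ∀ y ∈ l2, before x y = true) :
    PySem.List.insertBy before x (l1 ++ l2) = PySem.List.insertBy before x l1 ++ l2 := by
  induction l1 with
  | nil =>
    cases l2 with
    | nil => simp
    | cons y t =>
      simp [PySem.List.insertBy, h y List.mem_cons_self]
  | cons a l1 ih =>
    simp only [List.cons_append, PySem.List.insertBy]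
    by_cases hb : before x a
    · simp [hb]
    · simp [hb, ih]

lemma sorted_split {α : Type} (xs : List α) (key : α → Int) (c : Int)
    (h : ∀ x ∈ xs, key x ≤ c) :
    PySem.List.sorted xs key false
    = PySem.List.sorted (xs.filter (fun x => decide (key x < c))) key false
      ++ xs.filter (fun x => decide (key x = c)) := by
  induction xs using List.reverseRecOn with
  | nil => simp [PySem.List.sorted]
  | append_singleton xs x ih =>
    have hx : key x ≤ c := h x (by simp)
    have hxs : ∀ y ∈ xs, key y ≤ c := fun y hy => h y (by simp [hy])
    have step : ∀ (l : List α), PySem.List.sorted (l ++ [x]) key false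
        = PySem.List.insertBy (fun a b => decide (key a < key b)) x (PySem.List.sorted l key false) := by
      intro l
      rw [PySem.List.sorted_eq_foldl_insertBy, List.foldl_append, ← PySem.List.sorted_eq_foldl_insertBy]
      simp
    rw [step, ih hxs, List.filter_append, List.filter_append]
    by_cases hlt : key x < c
    · have hne : ¬(key x = c) := by omega
      rw [insertBy_append_right _ _ _ _ ?side]
      case side =>
        intro y hy
        rw [List.mem_filter] at hy
        have hyc : key y = c := by simpa using hy.2
        simp only [decide_eq_true_eq]
        omega
      have hdlt : decide (key x < c) = true := by simp [hlt]
      have hdne : decide (key x = c) = false := by simp [hne]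
      simp only [List.filter_cons, List.filter_nil, hdlt, hdne, if_true, Bool.false_eq_true,
        if_false, List.append_nil]
      rw [step]
    · have heq : key x = c := le_antisymm hx (by omega)
      rw [PySem.List.insertBy_of_forall_not_before _ _ _ ?side]
      case side =>
        intro y hy
        rcases List.mem_append.1 hy with hy1 | hy2
        · have hm := (PySem.List.mem_sorted _ _ _ _).1 hy1
          rw [List.mem_filter] at hm
          have hyc : key y < c := by simpa using hm.2
          simp only [decide_eq_false_iff_not]
          omega
        · rw [List.mem_filter] at hy2
          have hyc : key y = c := by simpa using hy2.2
          simp only [decide_eq_false_iff_not]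
          omega
      have hdlt : decide (key x < c) = false := by simp [hlt]
      have hdeq : decide (key x = c) = true := by simp [heq]
      simp only [List.filter_cons, List.filter_nil, hdlt, hdeq, if_true, Bool.false_eq_true,
        if_false, List.append_nil]
      rw [← List.append_assoc]

-- ===== VERDICT (by name: the statement is the Claim_ definition above) =====
theorem ordered_keys_py_spec : Claim_equal_ordered_keys_py := by
  intro stored catalog_keys sort_mode label_lookup _ hpre
  unfold Spec_ordered_keys_py ordered_keys_py ordered_keys_py_alt
  by_cases hc : (sort_mode == "manual" && !stored.isEmpty) = true
  · have hand := hc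
    rw [Bool.and_eq_true] at hand
    have hm : sort_mode = "manual" := by simpa using hand.1
    have hne : stored ≠ [] := by simpa using hand.2
    simp only [hc, if_true]
    rw [loop1_eq]
    rw [PySem.List.foldl_append_if_eq_filter]
    set sortable := catalog_keys.filter (fun k => !PySem.Set.contains PINNED_KEYS k) with hsortable
    set key : String → Int :=
      fun k => PySem.Dict.getD ((PySem.List.enumerate stored).foldl
        (fun d (p : Int × String) => PySem.Dict.setdefault d p.2 p.1) PySem.Dict.empty)
        k (stored.length : Int) with hkey
    have hkey' : ∀ x,
        key x = if x ∈ stored then (stored.idxOf x : Int) else (stored.length : Int) := by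
      intro x
      exact pos_getD stored x _
    have hle : ∀ x ∈ sortable, key x ≤ (stored.length : Int) := by
      intro x _
      rw [hkey']
      by_cases hst : x ∈ stored
      · simp only [hst, if_true]
        exact_mod_cast Nat.le_of_lt (List.idxOf_lt_length_of_mem hst)
      · simp [hst]
    rw [sorted_split sortable key (stored.length : Int) hle]
    dsimp only
    rw [List.nil_append]
    have hnd : ∀ x ∈ sortable, x ≠ "dashboard" := by
      intro x hx
      rw [hsortable, List.mem_filter] at hx
      simpa [PINNED_KEYS, PySem.Set.ofList] using hx.2
    have hfilterlt : sortable.filter (fun x => decide (key x < (stored.length : Int)))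
        = sortable.filter (fun x => stored.contains x) := by
      refine List.filter_congr fun x hx => ?_
      rw [hkey']
      by_cases hst : x ∈ stored
      · have hlt : (stored.idxOf x : Int) < (stored.length : Int) := by
          exact_mod_cast List.idxOf_lt_length_of_mem hst
        simp [hst, hlt]
      · simp [hst]
    rw [hfilterlt]
    have hsorted : PySem.List.sorted (sortable.filter (fun x => stored.contains x)) key false
        = dmNew sortable stored PySem.Set.empty := by
      refine PySem.List.sorted_eq_of_perm_of_pairwise_lt _ _ key ?perm ?pw
      case perm =>
        have hndfilter : (sortable.filter (fun x => stored.contains x)).Nodup := by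
          rw [List.nodup_iff_count_le_one]
          intro a
          by_cases ha : a ∈ sortable.filter (fun x => stored.contains x)
          · have hmem := List.mem_filter.1 ha
            have hst : a ∈ stored := by simpa using hmem.2
            have h1 : (sortable.filter (fun x => stored.contains x)).count a ≤ sortable.count a :=
              List.Sublist.count_le a List.filter_sublist
            have h2 : sortable.count a ≤ catalog_keys.count a := by
              rw [hsortable]
              exact List.Sublist.count_le a List.filter_sublist
            have h3 : catalog_keys.count a ≤ 1 := by
              rcases hpre hm hne a hst with hdash | hcnt
              · exact absurd hdash (hnd a hmem.1)
              · exact hcnt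
            omega
          · rw [List.count_eq_zero_of_not_mem ha]
            omega
        rw [List.perm_ext_iff_of_nodup (nodup_dmNew _ _ _) hndfilter]
        intro a
        rw [mem_dmNew, List.mem_filter]
        simp only [hsortable, List.mem_filter, PySem.Set.empty, List.not_mem_nil,
          not_false_iff, and_true, Bool.not_eq_eq_eq_not, Bool.not_true,
          PySem.Set.contains_iff, List.contains_iff_mem]
        tauto
      case pw =>
        refine List.Pairwise.imp_of_mem ?_ (dmNew_pairwise sortable stored PySem.Set.empty)
        intro a b ha hb hab
        have hast : a ∈ stored := ((mem_dmNew _ _ _ _).1 ha).1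
        have hbst : b ∈ stored := ((mem_dmNew _ _ _ _).1 hb).1
        rw [hkey' a, hkey' b]
        simp only [hast, hbst, if_true]
        exact_mod_cast hab
    rw [hsorted]
    have hfiltereq : sortable.filter (fun x => decide (key x = (stored.length : Int)))
        = sortable.filter (fun k => !PySem.Set.contains (dmSeen sortable stored PySem.Set.empty) k) := by
      refine List.filter_congr fun x hx => ?_
      have hcont : PySem.Set.contains (dmSeen sortable stored PySem.Set.empty) x
          = decide (x ∈ stored) := by
        by_cases hst : x ∈ stored
        · have hm' : x ∈ dmSeen sortable stored PySem.Set.empty :=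
            (mem_dmSeen _ _ _ _).2 (Or.inr ⟨hst, hx⟩)
          have hcc : PySem.Set.contains (dmSeen sortable stored PySem.Set.empty) x = true :=
            (PySem.Set.contains_iff _ _).2 hm'
          rw [hcc]
          simp [hst]
        · have hm' : x ∉ dmSeen sortable stored PySem.Set.empty := by
            rw [mem_dmSeen]
            simp [PySem.Set.empty, hst]
          have hcc : PySem.Set.contains (dmSeen sortable stored PySem.Set.empty) x = false := by
            rw [Bool.eq_false_iff]
            intro hcc
            exact hm' ((PySem.Set.contains_iff _ _).1 hcc)
          rw [hcc]
          simp [hst]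
      rw [hcont, hkey']
      by_cases hst : x ∈ stored
      · have hlen : (stored.idxOf x : Int) ≠ (stored.length : Int) := by
          have := List.idxOf_lt_length_of_mem hst
          omega
        simp [hst, hlen]
      · simp [hst]
    rw [hfiltereq]
  · have hc' : (sort_mode == "manual" && !stored.isEmpty) = false := by
      simpa using hc
    simp only [hc', Bool.false_eq_true, if_false]
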